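-- pv_equiv track=rewrite | github.com/tsukuba-websci/GenerativeAgentsPredictEmotion | analysis/panas_csv.py | sum_emotions_by_category
-- ===== SOURCE A (Python) =====
-- def sum_emotions_by_category(emotions_dict):
--     positive_emotions = {
--         "Attentive",
--         "Active",
--         "Alert",
--         "Excited",
--         "Enthusiastic",
--         "Determined",
--         "Inspired",
--         "Proud",
--         "Interested",
--         "Strong",
--     }
--     negative_emotions = {
--         "Hostile",
--         "Irritable",
--         "Ashamed",
--         "Guilty",
--         "Distressed",
--         "Upset",
--         "Scared",
--         "Afraid",
--         "Jittery",
--         "Nervous",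
--     }
--
--     positive_sum = 0
--     negative_sum = 0
--
--     for emotion, value in emotions_dict.items():
--         if emotion in positive_emotions:
--             positive_sum += value
--         elif emotion in negative_emotions:
--             negative_sum += value
--
--     return positive_sum, negative_sum
-- ===== SOURCE B (Python) =====
-- def sum_emotions_by_category(emotions_dict):
--     weights = {
--         "Attentive": 1, "Active": 1, "Alert": 1, "Excited": 1,
--         "Enthusiastic": 1, "Determined": 1, "Inspired": 1, "Proud": 1,
--         "Interested": 1, "Strong": 1,
--         "Hostile": -1, "Irritable": -1, "Ashamed": -1, "Guilty": -1,
--         "Distressed": -1, "Upset": -1, "Scared": -1, "Afraid": -1,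
--         "Jittery": -1, "Nervous": -1,
--     }
--     positive_sum = sum(emotions_dict.get(e, 0) for e, w in weights.items() if w > 0)
--     negative_sum = sum(emotions_dict.get(e, 0) for e, w in weights.items() if w < 0)
--     return positive_sum, negative_sum
-- ===== Notes on version B (the rewrite author's own statement) =====
-- stated objective: idiomatic
-- what changed: B replaces A's single loop over the dict items with if/elif set-membership branches by one signed-weight table of the twenty category emotions; B traverses that table and indexes emotions_dict.get(e, 0), so the input dict becomes a lookup table and the category data drives the iteration.
import Mathlib
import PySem

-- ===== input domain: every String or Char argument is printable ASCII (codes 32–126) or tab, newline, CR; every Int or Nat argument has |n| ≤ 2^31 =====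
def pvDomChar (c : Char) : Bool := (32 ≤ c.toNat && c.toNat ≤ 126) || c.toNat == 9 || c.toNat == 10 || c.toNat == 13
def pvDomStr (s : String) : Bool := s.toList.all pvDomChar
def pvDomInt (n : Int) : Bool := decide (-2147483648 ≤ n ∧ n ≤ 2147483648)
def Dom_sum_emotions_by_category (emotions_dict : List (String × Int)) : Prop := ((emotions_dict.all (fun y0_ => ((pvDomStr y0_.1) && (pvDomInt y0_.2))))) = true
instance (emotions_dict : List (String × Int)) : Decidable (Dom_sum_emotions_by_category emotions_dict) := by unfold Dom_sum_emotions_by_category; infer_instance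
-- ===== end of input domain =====

-- B replaces A's loop over the dict items (if/elif set membership) by a signed weight
-- table of the 20 category emotions, summing emotions_dict.get(e, 0) over its entries (idiomatic).

-- ===== PORT A =====
def pvPosA : List String :=
  ["Attentive", "Active", "Alert", "Excited", "Enthusiastic",
   "Determined", "Inspired", "Proud", "Interested", "Strong"]

def pvNegA : List String :=
  ["Hostile", "Irritable", "Ashamed", "Guilty", "Distressed",
   "Upset", "Scared", "Afraid", "Jittery", "Nervous"]

def sum_emotions_by_category (emotions_dict : List (String × Int)) : Int × Int :=
  emotions_dict.foldl
    (fun acc kv =>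
      if pvPosA.contains kv.1 then (acc.1 + kv.2, acc.2)
      else if pvNegA.contains kv.1 then (acc.1, acc.2 + kv.2)
      else acc)
    (0, 0)

-- ===== PORT B =====
def pvWeights : List (String × Int) :=
  [("Attentive", 1), ("Active", 1), ("Alert", 1), ("Excited", 1),
   ("Enthusiastic", 1), ("Determined", 1), ("Inspired", 1), ("Proud", 1),
   ("Interested", 1), ("Strong", 1),
   ("Hostile", -1), ("Irritable", -1), ("Ashamed", -1), ("Guilty", -1),
   ("Distressed", -1), ("Upset", -1), ("Scared", -1), ("Afraid", -1),
   ("Jittery", -1), ("Nervous", -1)]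

def sum_emotions_by_category_alt (emotions_dict : List (String × Int)) : Int × Int :=
  let d := PySem.Dict.mk emotions_dict
  (((pvWeights.filter (fun ew => 0 < ew.2)).map (fun ew => d.getD ew.1 0)).sum,
   ((pvWeights.filter (fun ew => ew.2 < 0)).map (fun ew => d.getD ew.1 0)).sum)

-- ===== PRECONDITION & SPEC =====
-- Pre_ excludes association lists with a repeated key: such a list does not represent any
-- Python dict (dict keys are unique), so neither Python program is ever run on one.
def Pre_sum_emotions_by_category (emotions_dict : List (String × Int)) : Prop :=
  (emotions_dict.map Prod.fst).Nodup

instance (emotions_dict : List (String × Int)) : Decidable (Pre_sum_emotions_by_category emotions_dict) := by unfold Pre_sum_emotions_by_category; infer_instance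

def pvWitness_sum_emotions_by_category : (List (String × Int)) := [("Proud", 3), ("Upset", 2), ("foo", 7)]

def Spec_sum_emotions_by_category (emotions_dict : List (String × Int)) (out : Int × Int) : Prop := out = sum_emotions_by_category_alt emotions_dict
instance (emotions_dict : List (String × Int)) (out : Int × Int) : Decidable (Spec_sum_emotions_by_category emotions_dict out) := by unfold Spec_sum_emotions_by_category; infer_instance

-- ===== CLAIM (what is proved, stated in full; the proofs are below) =====
def Claim_equal_sum_emotions_by_category : Prop := ∀ (emotions_dict : List (String × Int)), Dom_sum_emotions_by_category emotions_dict → Pre_sum_emotions_by_category emotions_dict → Spec_sum_emotions_by_category emotions_dict (sum_emotions_by_category emotions_dict)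

-- ===== LEMMAS AND PROOFS =====

-- sum of d.getD over a fixed key list (proof-side characterisation of each component of B).
def pvCatSum (d : PySem.Dict String Int) (es : List String) : Int :=
  (es.map (fun e => d.getD e 0)).sum

-- Recursive characterisation of A's two accumulators.
def pvPsum : List (String × Int) → Int
  | [] => 0
  | kv :: t => (if pvPosA.contains kv.1 then kv.2 else 0) + pvPsum t

def pvNsum : List (String × Int) → Int
  | [] => 0
  | kv :: t =>
      (if pvPosA.contains kv.1 then 0
       else if pvNegA.contains kv.1 then kv.2 else 0) + pvNsum t

theorem pvFoldA (l : List (String × Int)) (p n : Int) :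
    l.foldl
      (fun acc kv =>
        if pvPosA.contains kv.1 then (acc.1 + kv.2, acc.2)
        else if pvNegA.contains kv.1 then (acc.1, acc.2 + kv.2)
        else acc)
      (p, n) = (p + pvPsum l, n + pvNsum l) := by
  induction l generalizing p n with
  | nil => simp [pvPsum, pvNsum]
  | cons kv t ih =>
      simp only [List.foldl_cons, pvPsum, pvNsum]
      split_ifs with h1 h2 <;> rw [ih] <;> simp <;> try ring

theorem pvCatSum_cons (k : String) (v : Int) (t : List (String × Int)) (es : List String)
    (hk : k ∉ t.map Prod.fst) : es.Nodup →
    pvCatSum (PySem.Dict.mk ((k, v) :: t)) es =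
      pvCatSum (PySem.Dict.mk t) es + (if es.contains k then v else 0) := by
  induction es with
  | nil => intro _; simp [pvCatSum]
  | cons e es' ih =>
      intro hnd
      obtain ⟨he, hnd'⟩ := List.nodup_cons.mp hnd
      simp only [pvCatSum, List.map_cons, List.sum_cons] at *
      rw [ih hnd']
      rw [PySem.Dict.getD_eq_get?_getD, PySem.Dict.get?_mk_cons]
      by_cases hek : k = e
      · subst hek
        have hcont : (PySem.Dict.mk t).get? k = none := by
          rw [PySem.Dict.get?_eq_none_iff_not_mem_keys]
          simpa [PySem.Dict.keys] using hk
        simp [hcont, he, PySem.Dict.getD_eq_get?_getD]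
        ring
      · have hke : (k == e) = false := by rw [beq_eq_false_iff_ne]; exact hek
        have hek2 : (e == k) = false := by rw [beq_eq_false_iff_ne]; exact Ne.symm hek
        simp [hke, PySem.Dict.getD_eq_get?_getD, hek]
        ring

theorem pvDisj (k : String) (h : pvPosA.contains k = true) : pvNegA.contains k = false := by
  simp only [pvPosA, List.contains_eq_mem, decide_eq_true_eq] at h
  fin_cases h <;> decide

theorem pvCatSumPos (l : List (String × Int)) : (l.map Prod.fst).Nodup →
    pvCatSum (PySem.Dict.mk l) pvPosA = pvPsum l := by
  induction l with
  | nil => intro _; decide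
  | cons kv t ih =>
      intro hnd
      obtain ⟨k, v⟩ := kv
      rw [List.map_cons] at hnd
      obtain ⟨hk, hnd'⟩ := List.nodup_cons.mp hnd
      rw [pvCatSum_cons k v t pvPosA (by simpa using hk) (by decide), ih hnd']
      show _ = (if pvPosA.contains k then v else 0) + pvPsum t
      ring

theorem pvCatSumNeg (l : List (String × Int)) : (l.map Prod.fst).Nodup →
    pvCatSum (PySem.Dict.mk l) pvNegA = pvNsum l := by
  induction l with
  | nil => intro _; decide
  | cons kv t ih =>
      intro hnd
      obtain ⟨k, v⟩ := kv
      rw [List.map_cons] at hnd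
      obtain ⟨hk, hnd'⟩ := List.nodup_cons.mp hnd
      rw [pvCatSum_cons k v t pvNegA (by simpa using hk) (by decide), ih hnd']
      show _ = (if pvPosA.contains k then 0 else if pvNegA.contains k then v else 0) + pvNsum t
      by_cases hp : pvPosA.contains k = true
      · have hmem : k ∈ pvPosA := by simpa using hp
        have hneg : k ∉ pvNegA := by simpa using pvDisj k hp
        simp [hmem, hneg]
      · have hmem : k ∉ pvPosA := by simpa using hp
        simp [hmem]
        ring

-- The filtered weight-table key maps are exactly the two category key lists.
theorem pvFilterPos (d : PySem.Dict String Int) :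
    ((pvWeights.filter (fun ew => 0 < ew.2)).map (fun ew => d.getD ew.1 0)).sum =
      pvCatSum d pvPosA := by
  simp [pvWeights, pvPosA, pvCatSum]

theorem pvFilterNeg (d : PySem.Dict String Int) :
    ((pvWeights.filter (fun ew => ew.2 < 0)).map (fun ew => d.getD ew.1 0)).sum =
      pvCatSum d pvNegA := by
  simp [pvWeights, pvNegA, pvCatSum]

-- ===== VERDICT (by name: the statement is the Claim_ definition above) =====
theorem sum_emotions_by_category_spec : Claim_equal_sum_emotions_by_category := by
  intro l _ hpre
  unfold Spec_sum_emotions_by_category sum_emotions_by_category sum_emotions_by_category_alt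
  rw [pvFoldA]
  show _ = (_, _)
  rw [pvFilterPos, pvFilterNeg, pvCatSumPos l hpre, pvCatSumNeg l hpre]
  simp
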